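-- pv_equiv track=rewrite | github.com/Matt-Pisini/EE547_Cloud_Computing | public-21fa-ee547-master/hw1/hw1p2/hw1_part2.py | anagramCount
-- ===== SOURCE A (Python) =====
-- def anagramCount(word):
--     letter_dict = {}
--     anagram_len = len(word)
--     for char in word:
--         if char in letter_dict.keys():
--             letter_dict[char] += 1
--         else:
--             letter_dict[char] = 1
--
--     count = calcFactorial(anagram_len)
--
--     for key, val in letter_dict.items():
--         count //= calcFactorial(val)
--
--     return int(count)
--
-- def calcFactorial(x):
--     factorial = 1
--     while (x>0):
--         factorial = x * factorial
--         x -= 1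
--     return factorial
-- ===== SOURCE B (Python) =====
-- def anagramCount(word):
--     counts = {}
--     result = 1
--     i = 0
--     for ch in word:
--         i += 1
--         c = counts.get(ch, 0) + 1
--         counts[ch] = c
--         result = result * i // c
--     return result
-- ===== Notes on version B (the rewrite author's own statement) =====
-- stated objective: alternative
-- what changed: Replaces the two-phase count-then-divide-factorials algorithm by a single pass that never forms any factorial: a running count per letter and a running result updated as result = result * i // c, each intermediate being an exact partial multinomial.
import Mathlib
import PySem

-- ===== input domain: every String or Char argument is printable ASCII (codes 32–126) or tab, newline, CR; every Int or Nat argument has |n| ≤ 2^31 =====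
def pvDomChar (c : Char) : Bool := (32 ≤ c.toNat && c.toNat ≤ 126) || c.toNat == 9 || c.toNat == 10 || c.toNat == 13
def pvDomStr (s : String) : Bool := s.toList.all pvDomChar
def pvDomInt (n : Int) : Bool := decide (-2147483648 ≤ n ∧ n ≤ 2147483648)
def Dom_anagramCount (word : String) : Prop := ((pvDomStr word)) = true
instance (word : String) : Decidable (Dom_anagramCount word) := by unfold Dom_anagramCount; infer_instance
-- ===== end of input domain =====

-- B replaces A's count-then-divide-factorials scheme by a single pass that forms no
-- factorial at all (running per-letter count, result = result * i // c); alternative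
-- algorithm of the same asymptotic cost.

-- ===== PORT A =====
-- while (x>0): factorial = x * factorial; x -= 1
def calcFactAux (x fac : Int) : Int :=
  if 0 < x then calcFactAux (x - 1) (x * fac) else fac
termination_by x.toNat
decreasing_by omega

def calcFactorial (x : Int) : Int := calcFactAux x 1

def anagramCount (word : String) : Int :=
  let letterDict : PySem.Dict Char Int := word.toList.foldl
    (fun d ch => if d.contains ch then d.insert ch (d.getD ch 0 + 1) else d.insert ch 1)
    PySem.Dict.empty
  let anagramLen : Int := PySem.Str.len word
  let count := calcFactorial anagramLen
  let count := letterDict.items.foldl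
    (fun acc kv => PySem.Int.floordiv acc (calcFactorial kv.2)) count
  count

-- ===== PORT B =====
def anagramCount_alt (word : String) : Int :=
  let st := word.toList.foldl
    (fun (st : PySem.Dict Char Int × Int × Int) ch =>
      let i := st.2.1 + 1
      let c := st.1.getD ch 0 + 1
      (st.1.insert ch c, i, PySem.Int.floordiv (st.2.2 * i) c))
    (PySem.Dict.empty, 0, 1)
  st.2.2

-- ===== PRECONDITION & SPEC =====
def Spec_anagramCount (word : String) (out : Int) : Prop := out = anagramCount_alt word
instance (word : String) (out : Int) : Decidable (Spec_anagramCount word out) := by unfold Spec_anagramCount; infer_instance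

-- ===== CLAIM (what is proved, stated in full; the proofs are below) =====
def Claim_equal_anagramCount : Prop := ∀ (word : String), Dom_anagramCount word → Spec_anagramCount word (anagramCount word)

-- ===== LEMMAS AND PROOFS =====

-- the product of the factorials of the letter multiplicities, and the multinomial coefficient
def pvP (cs : List Char) : Nat := ∏ c ∈ cs.toFinset, (cs.count c).factorial
def pvM (cs : List Char) : Nat := Nat.multinomial cs.toFinset cs.count

lemma pvP_pos (cs : List Char) : 0 < pvP cs :=
  Finset.prod_pos (fun _ _ => Nat.factorial_pos _)

lemma sum_count_toFinset (cs : List Char) : ∑ c ∈ cs.toFinset, cs.count c = cs.length := by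
  simp

lemma pvPM (cs : List Char) : pvP cs * pvM cs = cs.length.factorial := by
  rw [pvP, pvM, Nat.multinomial_spec, sum_count_toFinset]

lemma pvM_eq_div (cs : List Char) : pvM cs = cs.length.factorial / pvP cs := by
  rw [← pvPM cs, Nat.mul_div_cancel_left _ (pvP_pos cs)]

lemma pvP_append (cs : List Char) (a : Char) :
    pvP (cs ++ [a]) = pvP cs * (cs.count a + 1) := by
  have hcount : ∀ c, (cs ++ [a]).count c = cs.count c + if c = a then 1 else 0 := by
    intro c; simp [List.count_append, List.count_singleton]
    split <;> simp_all [eq_comm]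
  by_cases h : a ∈ cs
  · have hmem : a ∈ cs.toFinset := by simpa using h
    have hto : (cs ++ [a]).toFinset = cs.toFinset := by
      ext x; simp; rintro rfl; exact h
    rw [pvP, pvP, hto, ← Finset.mul_prod_erase _ _ hmem, ← Finset.mul_prod_erase _ _ hmem]
    have hrest : ∀ x ∈ cs.toFinset.erase a,
        ((cs ++ [a]).count x).factorial = (cs.count x).factorial := by
      intro x hx
      rw [hcount x, if_neg (Finset.ne_of_mem_erase hx)]; rfl
    rw [Finset.prod_congr rfl hrest, hcount a, if_pos rfl, Nat.factorial_succ]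
    ring
  · have hc0 : cs.count a = 0 := List.count_eq_zero.mpr h
    have hmem : a ∉ cs.toFinset := by simpa using h
    have hto : (cs ++ [a]).toFinset = insert a cs.toFinset := by
      ext x; simp
    rw [pvP, pvP, hto, Finset.prod_insert hmem, hcount a, if_pos rfl, hc0]
    have hrest : ∀ x ∈ cs.toFinset,
        ((cs ++ [a]).count x).factorial = (cs.count x).factorial := by
      intro x hx
      rw [hcount x, if_neg (by rintro rfl; exact hmem hx)]; rfl
    rw [Finset.prod_congr rfl hrest]
    simp [Nat.factorial]

lemma pvM_step (cs : List Char) (a : Char) :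
    pvM (cs ++ [a]) * (cs.count a + 1) = pvM cs * (cs.length + 1) := by
  apply Nat.eq_of_mul_eq_mul_left (pvP_pos cs)
  calc pvP cs * (pvM (cs ++ [a]) * (cs.count a + 1))
      = pvP (cs ++ [a]) * pvM (cs ++ [a]) := by rw [pvP_append]; ring
    _ = (cs.length + 1).factorial := by
        rw [pvPM]; simp
    _ = pvP cs * (pvM cs * (cs.length + 1)) := by
        rw [Nat.factorial_succ, ← pvPM cs]; ring

lemma pvM_nil : pvM [] = 1 := by simp [pvM]

-- ---- B side ----

lemma B_loop (cs : List Char) :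
    cs.foldl
      (fun (st : PySem.Dict Char Int × Int × Int) ch =>
        let i := st.2.1 + 1
        let c := st.1.getD ch 0 + 1
        (st.1.insert ch c, i, PySem.Int.floordiv (st.2.2 * i) c))
      (PySem.Dict.empty, 0, 1)
    = (cs.foldl (fun d ch => d.insert ch (d.getD ch 0 + 1)) PySem.Dict.empty,
       (cs.length : Int), (pvM cs : Int)) := by
  induction cs using List.reverseRecOn with
  | nil => simp [pvM_nil]
  | append_singleton cs a ih =>
      rw [List.foldl_append, ih, List.foldl_append]
      simp only [List.foldl_cons, List.foldl_nil]
      have hd : (cs.foldl (fun d ch => d.insert ch (d.getD ch 0 + 1)) PySem.Dict.empty).getD a 0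
          = (cs.count a : Int) := by
        rw [PySem.Dict.getD_foldl_insert_add_one]
        simp [PySem.Dict.getD_empty]
      refine Prod.ext (by rw [hd]) (Prod.ext (by simp) ?_)
      show PySem.Int.floordiv ((pvM cs : Int) * ((cs.length : Int) + 1))
            ((cs.foldl (fun d ch => d.insert ch (d.getD ch 0 + 1)) PySem.Dict.empty).getD a 0 + 1)
          = (pvM (cs ++ [a]) : Int)
      rw [hd]
      rw [show (pvM cs : Int) * ((cs.length : Int) + 1) = ((pvM cs * (cs.length + 1) : Nat) : Int) by
            push_cast; ring,
          show ((cs.count a : Nat) : Int) + 1 = ((cs.count a + 1 : Nat) : Int) by push_cast; ring,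
          PySem.Int.floordiv_natCast]
      norm_cast
      rw [← pvM_step]
      exact Nat.mul_div_cancel _ (Nat.succ_pos _)

lemma alt_eq_pvM (word : String) : anagramCount_alt word = (pvM word.toList : Int) := by
  unfold anagramCount_alt
  rw [B_loop]

-- ---- A side ----

lemma calcFactAux_natCast (m : Nat) (f : Int) :
    calcFactAux (m : Int) f = (m.factorial : Int) * f := by
  induction m generalizing f with
  | zero => rw [calcFactAux]; norm_num
  | succ n ih =>
      rw [calcFactAux]
      have h : (0:Int) < ((n+1 : Nat) : Int) := by exact_mod_cast Nat.succ_pos n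
      rw [if_pos h]
      have h1 : ((n+1 : Nat) : Int) - 1 = (n : Int) := by push_cast; ring
      rw [h1, ih]
      push_cast [Nat.factorial_succ]
      ring

lemma calcFactorial_natCast (m : Nat) : calcFactorial (m : Int) = (m.factorial : Int) := by
  rw [calcFactorial, calcFactAux_natCast]; ring

lemma seqdiv (cs : List Char) : ∀ (ks : List Char) (N : Nat),
    ((ks.map (fun k => (cs.count k).factorial)).prod ∣ N) →
    ks.foldl (fun acc k => PySem.Int.floordiv acc (calcFactorial ((cs.count k : Nat) : Int))) (N : Int)
      = ((N / (ks.map (fun k => (cs.count k).factorial)).prod : Nat) : Int) := by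
  intro ks
  induction ks with
  | nil => intro N h; simp
  | cons k ks ih =>
      intro N h
      simp only [List.map_cons, List.prod_cons] at h ⊢
      have hfac : (cs.count k).factorial ∣ N := (dvd_mul_right _ _).trans h
      obtain ⟨c, hc⟩ := h
      simp only [List.foldl_cons]
      rw [calcFactorial_natCast, PySem.Int.floordiv_natCast]
      have hdiv : N / (cs.count k).factorial = (ks.map (fun k => (cs.count k).factorial)).prod * c := by
        rw [hc, mul_assoc, Nat.mul_div_cancel_left _ (Nat.factorial_pos _)]
      rw [ih (N / (cs.count k).factorial) ⟨c, hdiv⟩]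
      rw [Nat.div_div_eq_div_mul]

lemma A_dict (cs : List Char) :
    cs.foldl
      (fun d ch => if d.contains ch then d.insert ch (d.getD ch 0 + 1) else d.insert ch 1)
      PySem.Dict.empty = PySem.Dict.counter cs := by
  have hf : (fun (d : PySem.Dict Char Int) ch =>
      if d.contains ch then d.insert ch (d.getD ch 0 + 1) else d.insert ch 1)
      = fun d ch => d.insert ch (d.getD ch 0 + 1) := by
    funext d ch
    by_cases h : d.contains ch = true
    · rw [if_pos h]
    · rw [if_neg h, PySem.Dict.getD_of_not_contains d 0 (by simpa using h)]
      norm_num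
  rw [hf, PySem.Dict.foldl_insert_getD_add_one_eq_counter]

lemma prod_ofList_eq_pvP (cs : List Char) :
    ((PySem.Set.ofList cs).map (fun k => (cs.count k).factorial)).prod = pvP cs := by
  rw [pvP]
  have hto : (PySem.Set.ofList cs).toFinset = cs.toFinset := by
    ext x; simp [PySem.Set.mem_ofList]
  rw [← hto, List.prod_toFinset _ (PySem.Set.nodup_ofList cs)]

lemma A_eq_pvM (word : String) : anagramCount word = (pvM word.toList : Int) := by
  unfold anagramCount
  simp only [A_dict, PySem.Dict.items_counter, List.foldl_map, PySem.Str.len_eq]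
  rw [calcFactorial_natCast,
      seqdiv word.toList (PySem.Set.ofList word.toList) _
        (by rw [prod_ofList_eq_pvP]; exact ⟨pvM word.toList, (pvPM word.toList).symm⟩),
      prod_ofList_eq_pvP, ← pvM_eq_div]

-- ===== VERDICT (by name: the statement is the Claim_ definition above) =====
theorem anagramCount_spec : Claim_equal_anagramCount := by
  intro word _
  unfold Spec_anagramCount
  rw [A_eq_pvM, alt_eq_pvM]
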